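-- pv_equiv track=rewrite | github.com/trungnguyencs/Leetcode | 2616-minimize-the-maximum-difference-of-pairs/2616-minimize-the-maximum-difference-of-pairs.py | canFindKPairs
-- ===== SOURCE A (Python) =====
-- def canFindKPairs(d, nums, k):
--     i, count = 1, 0
--     while i < len(nums):
--         if nums[i] - nums[i-1] <= d:
--             count += 1
--             i += 1
--         i += 1
--     return count >= k
-- ===== SOURCE B (Python) =====
-- def canFindKPairs(d, nums, k):
--     # Suffix DP over adjacent pairs: best1 = dp[i+1], best2 = dp[i+2],
--     # dp[i] = max(dp[i+1], dp[i+2] + (nums[i+1]-nums[i] <= d)); return dp[0] >= k.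
--     best1, best2 = 0, 0
--     for x, y in reversed(list(zip(nums, nums[1:]))):
--         best1, best2 = max(best1, best2 + (1 if y - x <= d else 0)), best1
--     return best1 >= k
-- ===== Notes on version B (the rewrite author's own statement) =====
-- stated objective: alternative
-- what changed: Replaces A's greedy skip-by-two pointer loop with a right-to-left dynamic program over adjacent pairs (dp[i] = max(dp[i+1], dp[i+2] + pairable(i))), relying on the fact that left-to-right greedy matching on a path attains the DP optimum.
import Mathlib
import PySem

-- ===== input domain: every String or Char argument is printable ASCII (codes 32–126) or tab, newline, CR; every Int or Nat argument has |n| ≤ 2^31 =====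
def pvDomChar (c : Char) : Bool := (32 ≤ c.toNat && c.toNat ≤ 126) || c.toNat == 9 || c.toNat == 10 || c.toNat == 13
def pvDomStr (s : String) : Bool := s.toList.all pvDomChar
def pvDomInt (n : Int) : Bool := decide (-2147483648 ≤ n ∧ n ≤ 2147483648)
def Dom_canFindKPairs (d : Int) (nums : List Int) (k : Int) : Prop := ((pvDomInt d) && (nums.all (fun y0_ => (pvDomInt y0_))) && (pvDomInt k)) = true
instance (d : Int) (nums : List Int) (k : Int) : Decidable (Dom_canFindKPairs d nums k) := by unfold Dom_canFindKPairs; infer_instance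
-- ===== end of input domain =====

-- B replaces A's greedy skip-by-two pointer with a right-to-left DP over adjacent
-- pairs (same cost, different algorithm); the two are proved to return equal values.

-- ===== PORT A =====
-- A's while loop: state (i, count); i jumps by 2 after a counted pair, else by 1.
-- fuel is a totality guard only: i grows by ≥ 1 per iteration, so fuel = nums.length
-- (with i starting at 1) is never exhausted while i < nums.length.
def pvLoopA (d : Int) (nums : List Int) : Nat → Nat → Int → Int
  | 0, _, count => count
  | fuel+1, i, count =>
    if i < nums.length then
      if nums.getD i 0 - nums.getD (i-1) 0 ≤ d then
        pvLoopA d nums fuel (i + 2) (count + 1)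
      else
        pvLoopA d nums fuel (i + 1) count
    else count

def canFindKPairs (d : Int) (nums : List Int) (k : Int) : Bool :=
  decide (pvLoopA d nums nums.length 1 0 ≥ k)

-- ===== PORT B =====
-- one DP step: state (dp[i+1], dp[i+2]), pair (nums[i], nums[i+1])
def pvStepB (d : Int) (st : Int × Int) (p : Int × Int) : Int × Int :=
  (max st.1 (st.2 + (if p.2 - p.1 ≤ d then 1 else 0)), st.1)

def canFindKPairs_alt (d : Int) (nums : List Int) (k : Int) : Bool :=
  let pairs := nums.zip (PySem.List.slice nums (some 1) none)
  let st := pairs.reverse.foldl (pvStepB d) (0, 0)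
  decide (st.1 ≥ k)

-- ===== PRECONDITION & SPEC =====
def Spec_canFindKPairs (d : Int) (nums : List Int) (k : Int) (out : Bool) : Prop := out = canFindKPairs_alt d nums k
instance (d : Int) (nums : List Int) (k : Int) (out : Bool) : Decidable (Spec_canFindKPairs d nums k out) := by unfold Spec_canFindKPairs; infer_instance

-- ===== CLAIM (what is proved, stated in full; the proofs are below) =====
def Claim_equal_canFindKPairs : Prop := ∀ (d : Int) (nums : List Int) (k : Int), Dom_canFindKPairs d nums k → Spec_canFindKPairs d nums k (canFindKPairs d nums k)

-- ===== LEMMAS AND PROOFS =====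

-- optimal number of disjoint adjacent pairs with difference ≤ d (proof artifact)
def pvO (d : Int) : List Int → Int
  | [] => 0
  | [_] => 0
  | x :: y :: r => max (pvO d (y :: r)) ((if y - x ≤ d then 1 else 0) + pvO d r)

-- A's greedy, as structural recursion on the list
def pvG (d : Int) : List Int → Int
  | [] => 0
  | [_] => 0
  | x :: y :: r => if y - x ≤ d then 1 + pvG d r else pvG d (y :: r)

theorem pvO_mono (d : Int) (a : Int) (l : List Int) : pvO d l ≤ pvO d (a :: l) := by
  cases l with
  | nil => simp [pvO]
  | cons b r => exact le_max_left _ _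

theorem pvO_step (d : Int) (a : Int) (l : List Int) : pvO d (a :: l) ≤ 1 + pvO d l := by
  cases l with
  | nil => simp [pvO]
  | cons b r =>
    have h1 : pvO d r ≤ pvO d (b :: r) := pvO_mono d b r
    simp only [pvO]
    apply max_le
    · omega
    · split_ifs <;> omega

theorem pvG_eq_pvO (d : Int) (l : List Int) : pvG d l = pvO d l := by
  induction l using pvG.induct d with
  | case1 => rfl
  | case2 => rfl
  | case3 x y r h ih =>
    have hs := pvO_step d y r
    simp only [pvG, pvO, if_pos h, ih]
    omega
  | case4 x y r h ih =>
    have hm := pvO_mono d y r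
    simp only [pvG, pvO, if_neg h, ih]
    omega

theorem pvG_short (d : Int) (l : List Int) (h : l.length ≤ 1) : pvG d l = 0 := by
  match l, h with
  | [], _ => rfl
  | [_], _ => rfl

theorem pvLoopA_eq (d : Int) (nums : List Int) (fuel i : Nat) (c : Int) (hi : 1 ≤ i)
    (hf : nums.length ≤ fuel + i) :
    pvLoopA d nums fuel i c = c + pvG d (nums.drop (i - 1)) := by
  induction fuel generalizing i c with
  | zero =>
    rw [pvLoopA, pvG_short d _ (by simp [List.length_drop]; omega)]
    ring
  | succ fuel ih =>
    rw [pvLoopA]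
    by_cases h : i < nums.length
    · have hd1 : nums.drop (i - 1) = nums[i-1]'(by omega) :: nums.drop i := by
        rw [List.drop_eq_getElem_cons (show i - 1 < nums.length by omega),
          show i - 1 + 1 = i from by omega]
      have hd2 : nums.drop i = nums[i] :: nums.drop (i + 1) := List.drop_eq_getElem_cons h
      have hg1 : nums.getD i 0 = nums[i] := List.getD_eq_getElem nums 0 h
      have hg2 : nums.getD (i-1) 0 = nums[i-1]'(by omega) :=
        List.getD_eq_getElem nums 0 (by omega)
      rw [if_pos h, hg1, hg2, hd1, hd2]
      by_cases hle : nums[i] - nums[i-1]'(by omega) ≤ d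
      · rw [if_pos hle, ih (i + 2) (c + 1) (by omega) (by omega),
          show i + 2 - 1 = i + 1 from rfl]
        simp only [pvG, if_pos hle]
        ring
      · rw [if_neg hle, ih (i + 1) c (by omega) (by omega),
          show i + 1 - 1 = i from rfl, hd2]
        simp only [pvG, if_neg hle]
    · rw [if_neg h, pvG_short d _ (by simp [List.length_drop]; omega)]
      ring

theorem pvFold_eq (d : Int) (l : List Int) :
    (l.zip l.tail).foldr (fun p st => pvStepB d st p) (0, 0) = (pvO d l, pvO d l.tail) := by
  induction l using pvO.induct with
  | case1 => rfl
  | case2 => rfl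
  | case3 x y r ih1 _ =>
    show ((x, y) :: ((y :: r).zip r)).foldr _ _ = _
    have : (y :: r).zip r = (y :: r).zip (y :: r).tail := rfl
    rw [List.foldr_cons, this, ih1]
    simp only [pvStepB, pvO, List.tail_cons]
    rw [Int.add_comm]

theorem canFindKPairs_spec' (d : Int) (nums : List Int) (k : Int) :
    canFindKPairs d nums k = canFindKPairs_alt d nums k := by
  simp only [canFindKPairs, canFindKPairs_alt, PySem.List.slice_from_one,
    List.foldl_reverse]
  rw [pvLoopA_eq d nums nums.length 1 0 (le_refl 1) (by omega)]
  rw [pvFold_eq d nums]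
  simp [pvG_eq_pvO]

-- ===== VERDICT (by name: the statement is the Claim_ definition above) =====
theorem canFindKPairs_spec : Claim_equal_canFindKPairs := by
  intro d nums k _
  exact canFindKPairs_spec' d nums k
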